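-- pv_equiv track=rewrite | github.com/usk-johnny-s/UTF8_Print_AdaGfx | fontconvert/font_converter.py | get_glyph_bitstream
-- ===== SOURCE A (Python) =====
-- def get_glyph_bitstream(list_bitstreamlen_list_chara,chara_dict_bitstream,tofu_chara):
--     bitstream = ''
--     tofu_pos = 0
--     for bitstreamlen_list_chara in list_bitstreamlen_list_chara:
--         bitstreamlen = bitstreamlen_list_chara[0]
--         list_chara = bitstreamlen_list_chara[1]
--         for chara in list_chara:
--             chara_bitstream = chara_dict_bitstream[chara]
--             chara_bitstreamlen = len(chara_bitstream)
--             if (bitstreamlen > chara_bitstreamlen):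
--                 chara_bitstream += '1'*(bitstreamlen-chara_bitstreamlen)
--             if chara == tofu_chara:
--                 tofu_pos = len(bitstream)
--             bitstream += chara_bitstream
--     return bitstream,tofu_pos
-- ===== SOURCE B (Python) =====
-- def get_glyph_bitstream(list_bitstreamlen_list_chara, chara_dict_bitstream, tofu_chara):
--     flat = [(blen, c) for blen, cs in list_bitstreamlen_list_chara for c in cs]
--     bitstream = ''.join(chara_dict_bitstream[c].ljust(blen, '1') for blen, c in flat)
--     # back-to-front arithmetic scan: position of the LAST tofu piece, no strings rebuilt
--     tofu_pos = 0
--     rem = len(bitstream)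
--     for blen, c in reversed(flat):
--         rem -= max(blen, len(chara_dict_bitstream[c]))
--         if c == tofu_chara:
--             tofu_pos = rem
--             break
--     return bitstream, tofu_pos
-- ===== Notes on version B (the rewrite author's own statement) =====
-- stated objective: alternative
-- what changed: Replaces A's fused forward loop (grow string + record tofu offset as it goes) with a join of str.ljust-padded pieces plus a separate back-to-front arithmetic scan that subtracts max(width, len) per glyph and stops at the first match from the end, never rebuilding strings for the position.
-- outside the precondition, e.g. on get_glyph_bitstream([(3, ['x'])], {'a': '01'}, 'a'): A raises KeyError, B raises KeyError
import Mathlib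
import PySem

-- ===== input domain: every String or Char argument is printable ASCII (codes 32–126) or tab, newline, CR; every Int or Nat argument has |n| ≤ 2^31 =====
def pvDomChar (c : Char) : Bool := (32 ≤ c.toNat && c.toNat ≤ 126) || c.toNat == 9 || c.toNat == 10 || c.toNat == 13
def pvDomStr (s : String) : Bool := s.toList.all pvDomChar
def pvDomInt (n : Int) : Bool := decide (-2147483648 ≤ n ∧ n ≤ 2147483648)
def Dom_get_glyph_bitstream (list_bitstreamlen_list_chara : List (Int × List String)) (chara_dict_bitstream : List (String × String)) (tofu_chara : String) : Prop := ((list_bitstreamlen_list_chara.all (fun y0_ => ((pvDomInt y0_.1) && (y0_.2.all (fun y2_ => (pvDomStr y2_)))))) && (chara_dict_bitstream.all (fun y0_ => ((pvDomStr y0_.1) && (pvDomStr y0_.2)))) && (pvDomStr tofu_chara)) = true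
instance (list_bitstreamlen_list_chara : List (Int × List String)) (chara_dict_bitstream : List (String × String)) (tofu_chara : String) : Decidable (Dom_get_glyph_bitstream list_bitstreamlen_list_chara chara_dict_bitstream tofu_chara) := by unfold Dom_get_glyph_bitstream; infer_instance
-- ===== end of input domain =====

-- B joins str.ljust-padded pieces and then finds tofu_pos by a back-to-front arithmetic scan
-- (subtracting max(width, len) lengths, stopping at the first match from the end) instead of
-- A's fused forward loop that grows the string and records positions as it goes (objective: alternative).

-- ===== PORT A =====
-- chara_dict_bitstream[chara] raises KeyError for a missing key; Pre_ excludes that, the port reads "" there.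
def get_glyph_bitstream (list_bitstreamlen_list_chara : List (Int × List String)) (chara_dict_bitstream : List (String × String)) (tofu_chara : String) : String × Int :=
  let d := PySem.Dict.ofList chara_dict_bitstream
  let r :=
    list_bitstreamlen_list_chara.foldl (fun (st : List Char × Int) bitstreamlen_list_chara =>
      let bitstreamlen := bitstreamlen_list_chara.1
      let list_chara := bitstreamlen_list_chara.2
      list_chara.foldl (fun (st : List Char × Int) chara =>
        let chara_bitstream := (PySem.Dict.getD d chara "").toList
        let chara_bitstreamlen : Int := (chara_bitstream.length : Int)
        let chara_bitstream :=
          if bitstreamlen > chara_bitstreamlen then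
            chara_bitstream ++ PySem.List.pyRepeat ['1'] (bitstreamlen - chara_bitstreamlen)
          else chara_bitstream
        let tofu_pos := if chara == tofu_chara then (st.1.length : Int) else st.2
        (st.1 ++ chara_bitstream, tofu_pos)) st) (([] : List Char), (0 : Int))
  (String.ofList r.1, r.2)

-- ===== PORT B =====
-- hand port of Python str.ljust(w, '1'): pad on the right to width w, no-op if already ≥ w (exact)
def pvLjust (bs : String) (w : Int) : List Char :=
  if ((bs.toList.length : Int) < w) then
    bs.toList ++ PySem.List.pyRepeat ['1'] (w - (bs.toList.length : Int))
  else bs.toList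

-- Source B's `for blen, c in reversed(flat): rem -= max(...); if c == tofu: tofu_pos = rem; break`
def pvTofuLoop (t : String) (d : PySem.Dict String String) : Int → List (Int × String) → Int
  | _, [] => 0
  | rem, (blen, c) :: rest =>
      let rem' := rem - max blen (((PySem.Dict.getD d c "").toList.length : Int))
      if c == t then rem' else pvTofuLoop t d rem' rest

def get_glyph_bitstream_alt (list_bitstreamlen_list_chara : List (Int × List String)) (chara_dict_bitstream : List (String × String)) (tofu_chara : String) : String × Int :=
  let d := PySem.Dict.ofList chara_dict_bitstream
  let flat := list_bitstreamlen_list_chara.flatMap (fun p => p.2.map (fun c => (p.1, c)))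
  let bitstream := (flat.map (fun q => pvLjust (PySem.Dict.getD d q.2 "") q.1)).flatten
  let tofu_pos := pvTofuLoop tofu_chara d (bitstream.length : Int) flat.reverse
  (String.ofList bitstream, tofu_pos)

-- ===== PRECONDITION & SPEC =====
-- Pre_ excludes exactly the inputs on which Python A raises KeyError: some listed chara not a key of the dict.
def Pre_get_glyph_bitstream (list_bitstreamlen_list_chara : List (Int × List String)) (chara_dict_bitstream : List (String × String)) (tofu_chara : String) : Prop :=
  ∀ p ∈ list_bitstreamlen_list_chara, ∀ c ∈ p.2, c ∈ chara_dict_bitstream.map Prod.fst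
instance (list_bitstreamlen_list_chara : List (Int × List String)) (chara_dict_bitstream : List (String × String)) (tofu_chara : String) : Decidable (Pre_get_glyph_bitstream list_bitstreamlen_list_chara chara_dict_bitstream tofu_chara) := by unfold Pre_get_glyph_bitstream; infer_instance

def pvWitness_get_glyph_bitstream : (List (Int × List String)) × (List (String × String)) × String :=
  ([(4, ["a", "b"]), (2, ["a"])], [("a", "01"), ("b", "001")], "b")

def Spec_get_glyph_bitstream (list_bitstreamlen_list_chara : List (Int × List String)) (chara_dict_bitstream : List (String × String)) (tofu_chara : String) (out : String × Int) : Prop := out = get_glyph_bitstream_alt list_bitstreamlen_list_chara chara_dict_bitstream tofu_chara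
instance (list_bitstreamlen_list_chara : List (Int × List String)) (chara_dict_bitstream : List (String × String)) (tofu_chara : String) (out : String × Int) : Decidable (Spec_get_glyph_bitstream list_bitstreamlen_list_chara chara_dict_bitstream tofu_chara out) := by unfold Spec_get_glyph_bitstream; infer_instance

-- ===== CLAIM =====
def Claim_equal_get_glyph_bitstream : Prop := ∀ (list_bitstreamlen_list_chara : List (Int × List String)) (chara_dict_bitstream : List (String × String)) (tofu_chara : String), Dom_get_glyph_bitstream list_bitstreamlen_list_chara chara_dict_bitstream tofu_chara → Pre_get_glyph_bitstream list_bitstreamlen_list_chara chara_dict_bitstream tofu_chara → Spec_get_glyph_bitstream list_bitstreamlen_list_chara chara_dict_bitstream tofu_chara (get_glyph_bitstream list_bitstreamlen_list_chara chara_dict_bitstream tofu_chara)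

-- ===== LEMMAS AND PROOFS =====

-- A's loop step on the flattened piece list, and the forward (pos, offset) position step.
def pvStepA (t : String) (st : List Char × Int) (q : String × List Char) : List Char × Int :=
  (st.1 ++ q.2, if q.1 == t then (st.1.length : Int) else st.2)
def pvStep2 (t : String) (st : Int × Int) (q : String × List Char) : Int × Int :=
  (if q.1 == t then st.2 else st.1, st.2 + (q.2.length : Int))

-- Backward search with explicit remaining-length accumulator, as an Option (none = no match).
def pvAux (t : String) : Int → List (String × Int) → Option Int
  | _, [] => none
  | rem, (c, l) :: rest =>
      if c == t then some (rem - l) else pvAux t (rem - l) rest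

def pvS (ps : List (String × Int)) : Int := (ps.map Prod.snd).sum

-- 1. A's nested fold is the single fold of pvStepA over the flattened (chara, padded-piece) list.
lemma pvFlattenLoop (t : String) (d : PySem.Dict String String)
    (L : List (Int × List String)) (st : List Char × Int) :
    L.foldl (fun (st : List Char × Int) p =>
      p.2.foldl (fun (st : List Char × Int) chara =>
        let chara_bitstream := (PySem.Dict.getD d chara "").toList
        let chara_bitstreamlen : Int := (chara_bitstream.length : Int)
        let chara_bitstream :=
          if p.1 > chara_bitstreamlen then
            chara_bitstream ++ PySem.List.pyRepeat ['1'] (p.1 - chara_bitstreamlen)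
          else chara_bitstream
        let tofu_pos := if chara == t then (st.1.length : Int) else st.2
        (st.1 ++ chara_bitstream, tofu_pos)) st) st
    = (L.flatMap (fun p => p.2.map (fun chara => (chara, pvLjust (PySem.Dict.getD d chara "") p.1)))).foldl (pvStepA t) st := by
  induction L generalizing st with
  | nil => rfl
  | cons p L ih =>
      simp only [List.foldl_cons, List.flatMap_cons, List.foldl_append, List.foldl_map, ih]
      rfl

-- 2. A fold of pvStepA computes (prefix ++ joined pieces, forward position accumulator).
lemma pvSplitLoop (t : String) (pieces : List (String × List Char)) (b0 : List Char) (tp0 : Int) :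
    pieces.foldl (pvStepA t) (b0, tp0)
    = (b0 ++ (pieces.map (fun q => q.2)).flatten,
       (pieces.foldl (pvStep2 t) (tp0, (b0.length : Int))).1) := by
  induction pieces generalizing b0 tp0 with
  | nil => simp
  | cons q rest ih =>
      simp only [List.foldl_cons, List.map_cons, List.flatten_cons, pvStepA, pvStep2, ih]
      simp [List.append_assoc, List.length_append]

-- 3. pvAux over an appended list splits.
lemma pvAux_append (t : String) (xs ys : List (String × Int)) (rem : Int) :
    pvAux t rem (xs ++ ys) = (pvAux t rem xs).or (pvAux t (rem - pvS xs) ys) := by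
  induction xs generalizing rem with
  | nil => simp [pvAux, pvS]
  | cons q rest ih =>
      obtain ⟨c, l⟩ := q
      by_cases h : c == t <;> simp [pvAux, h, ih, pvS, sub_sub]

-- getD through Option.or chains defaults.
lemma pvOr_getD (a b : Option Int) (p : Int) : (a.or b).getD p = a.getD (b.getD p) := by
  cases a <;> simp

-- 4. The forward position fold equals the backward search on the reversed length list.
lemma pvForwardBackward (t : String) (pieces : List (String × List Char)) (pos acc : Int) :
    (pieces.foldl (pvStep2 t) (pos, acc)).1
    = (pvAux t (acc + pvS (pieces.map (fun q => (q.1, (q.2.length : Int)))))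
        ((pieces.map (fun q => (q.1, (q.2.length : Int)))).reverse)).getD pos := by
  induction pieces generalizing pos acc with
  | nil => simp [pvAux, pvS]
  | cons q rest ih =>
      have hs : pvS ((rest.map (fun q => (q.1, (q.2.length : Int)))).reverse)
          = pvS (rest.map (fun q => (q.1, (q.2.length : Int)))) := by
        simp [pvS, List.map_reverse]
      simp only [List.foldl_cons, pvStep2, List.map_cons, List.reverse_cons]
      rw [ih, pvAux_append, pvOr_getD, hs]
      have e1 : acc + pvS ((q.1, (q.2.length : Int)) :: rest.map (fun q => (q.1, (q.2.length : Int))))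
          = acc + (q.2.length : Int) + pvS (rest.map (fun q => (q.1, (q.2.length : Int)))) := by
        simp [pvS]; ring
      rw [e1]
      by_cases h : q.1 == t <;> simp [pvAux, h]

-- 5. pvTofuLoop is pvAux with default 0 over the (chara, max-length) list.
lemma pvTofuLoop_aux (t : String) (d : PySem.Dict String String) (l : List (Int × String)) (rem : Int) :
    pvTofuLoop t d rem l
    = (pvAux t rem (l.map (fun q => (q.2, max q.1 (((PySem.Dict.getD d q.2 "").toList.length : Int)))))).getD 0 := by
  induction l generalizing rem with
  | nil => rfl
  | cons q rest ih =>
      obtain ⟨blen, c⟩ := q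
      by_cases h : c == t <;> simp [pvTofuLoop, pvAux, h, ih]

-- 6. Length of a ljust-padded piece, as an Int, is max width len.
lemma pvLjust_length (bs : String) (w : Int) :
    ((pvLjust bs w).length : Int) = max w (bs.toList.length : Int) := by
  unfold pvLjust
  split_ifs with h
  · simp [PySem.List.pyRepeat_singleton]
    omega
  · omega

-- ===== VERDICT =====
theorem get_glyph_bitstream_spec : Claim_equal_get_glyph_bitstream := by
  intro L dl t _ _
  unfold Spec_get_glyph_bitstream get_glyph_bitstream get_glyph_bitstream_alt
  simp only []
  rw [pvFlattenLoop t (PySem.Dict.ofList dl) L ([], 0),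
      pvSplitLoop t _ ([] : List Char) 0]
  set d := PySem.Dict.ofList dl
  set flat := L.flatMap (fun p => p.2.map (fun c => (p.1, c))) with hflat
  set pieces := L.flatMap (fun p => p.2.map (fun chara => (chara, pvLjust (PySem.Dict.getD d chara "") p.1))) with hpieces
  have hp : pieces = flat.map (fun q => (q.2, pvLjust (PySem.Dict.getD d q.2 "") q.1)) := by
    simp [hpieces, hflat, List.map_flatMap, List.map_map, Function.comp_def]
  have hbit : (flat.map (fun q => pvLjust (PySem.Dict.getD d q.2 "") q.1)).flatten
      = (pieces.map (fun q => q.2)).flatten := by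
    rw [hp]; simp [List.map_map, Function.comp_def]
  have hlen : (((flat.map (fun q => pvLjust (PySem.Dict.getD d q.2 "") q.1)).flatten).length : Int)
      = pvS (pieces.map (fun q => (q.1, (q.2.length : Int)))) := by
    rw [hbit]
    simp [pvS, List.length_flatten, List.map_map, Function.comp_def]

  have hmap : flat.reverse.map (fun q => (q.2, max q.1 (((PySem.Dict.getD d q.2 "").toList.length : Int))))
      = (pieces.map (fun q => (q.1, (q.2.length : Int)))).reverse := by
    rw [hp]
    simp only [List.map_reverse, List.map_map, Function.comp_def]
    congr 1
    apply List.map_congr_left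
    intro q _
    simp [pvLjust_length]
  simp only [Prod.mk.injEq]
  constructor
  · simp [hbit]
  · rw [pvForwardBackward, pvTofuLoop_aux, hmap, hlen]
    simp
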